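-- pv_equiv track=rewrite | github.com/HungryPoitrasths/mybenchmark | scripts/run_vlm_referability.py | _build_frame_label_candidates
-- ===== SOURCE A (Python) =====
-- from collections import defaultdict
-- from typing import Any, Callable
--
-- EXCLUDED_LABELS: set[str] = set()
--
-- def _build_frame_label_candidates(
--     visible_object_ids: list[int],
--     objects_by_id: dict[int, dict[str, Any]],
-- ) -> tuple[list[str], dict[str, list[int]]]:
--     label_to_ids: dict[str, list[int]] = defaultdict(list)
--     for obj_id in visible_object_ids:
--         obj = objects_by_id.get(int(obj_id))
--         if obj is None:
--             continue
--         label = str(obj.get("label", "")).strip().lower()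
--         if not label or label in EXCLUDED_LABELS:
--             continue
--         label_to_ids[label].append(int(obj_id))
--     normalized = {
--         str(label): sorted(set(int(obj_id) for obj_id in obj_ids))
--         for label, obj_ids in sorted(label_to_ids.items())
--     }
--     return sorted(normalized.keys()), normalized
-- ===== SOURCE B (Python) =====
-- EXCLUDED_LABELS: set = set()
--
--
-- def _build_frame_label_candidates(visible_object_ids, objects_by_id):
--     # one pass: collect (label, id) pairs, sort once, then a single
--     # group-by-runs scan (consecutive dedup) over the sorted pairs
--     pairs = []
--     for obj_id in visible_object_ids:
--         obj = objects_by_id.get(int(obj_id))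
--         if obj is None:
--             continue
--         label = str(obj.get("label", "")).strip().lower()
--         if not label or label in EXCLUDED_LABELS:
--             continue
--         pairs.append((label, int(obj_id)))
--     pairs.sort()
--     normalized = {}
--     n = len(pairs)
--     i = 0
--     while i < n:
--         label = pairs[i][0]
--         ids = []
--         while i < n and pairs[i][0] == label:
--             if not ids or ids[-1] != pairs[i][1]:
--                 ids.append(pairs[i][1])
--             i += 1
--         normalized[label] = ids
--     return list(normalized.keys()), normalized
-- ===== Notes on version B (the rewrite author's own statement) =====
-- stated objective: alternative
-- what changed: Replaces the defaultdict bucket-per-label build followed by per-bucket sorted(set(...)) and a sort of the items with a single flat (label,id) pair list that is sorted once lexicographically and then grouped in one linear scan with consecutive-duplicate skipping, producing keys already in sorted order.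
import Mathlib
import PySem

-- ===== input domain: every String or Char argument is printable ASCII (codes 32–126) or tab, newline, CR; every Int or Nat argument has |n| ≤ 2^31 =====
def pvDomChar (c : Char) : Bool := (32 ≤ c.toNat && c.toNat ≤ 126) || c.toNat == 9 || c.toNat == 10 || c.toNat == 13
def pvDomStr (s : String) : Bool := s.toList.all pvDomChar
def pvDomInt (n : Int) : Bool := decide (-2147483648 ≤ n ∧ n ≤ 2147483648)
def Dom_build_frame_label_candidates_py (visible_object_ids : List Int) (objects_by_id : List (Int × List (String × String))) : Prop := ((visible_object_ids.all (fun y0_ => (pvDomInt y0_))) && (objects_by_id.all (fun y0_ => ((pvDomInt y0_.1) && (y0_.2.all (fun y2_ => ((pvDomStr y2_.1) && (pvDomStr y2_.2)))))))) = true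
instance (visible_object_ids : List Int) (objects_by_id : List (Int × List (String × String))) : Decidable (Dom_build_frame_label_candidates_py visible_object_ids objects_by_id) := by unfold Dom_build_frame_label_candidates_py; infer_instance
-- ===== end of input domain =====

-- B replaces A's per-label hash buckets (+ per-bucket sorted(set) + item sort) by one
-- lexicographic sort of flat (label, id) pairs followed by a single grouping scan with
-- consecutive-duplicate skipping; same return value, similar cost (objective: alternative).

-- ===== PORT A =====
def pvEXCLUDED_LABELS : PySem.Set String := PySem.Set.empty

def build_frame_label_candidates_py (visible_object_ids : List Int) (objects_by_id : List (Int × List (String × String))) : List String × (List (String × List Int)) :=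
  let label_to_ids : PySem.Dict String (List Int) :=
    visible_object_ids.foldl (fun d obj_id =>
      match (PySem.Dict.mk objects_by_id).get? obj_id with
      | none => d
      | some obj =>
        let label := PySem.Str.lower (PySem.Str.strip ((PySem.Dict.mk obj).getD "label" ""))
        if label = "" ∨ PySem.Set.contains pvEXCLUDED_LABELS label then d
        else d.modify label [] (fun ids => ids ++ [obj_id])) PySem.Dict.empty
  -- sorted(label_to_ids.items()) compares (label, ids) tuples; the labels (dict keys) are
  -- pairwise distinct, so the stable sort on the first component alone is exact here
  let normalized : PySem.Dict String (List Int) :=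
    (PySem.List.sorted label_to_ids.items (fun p => p.1)).foldl
      (fun d p => d.insert p.1 (PySem.List.sorted (PySem.Set.ofList p.2) (fun x => x)))
      PySem.Dict.empty
  (PySem.List.sorted normalized.keys (fun k => k), normalized.items)

-- ===== PORT B =====
-- the outer while loop of Source B: consume one maximal run of equal labels per step;
-- the inner while loop is the fold (append p.2 unless it equals the last id appended)
def pvGroupRuns : List (String × Int) → List (String × List Int)
  | [] => []
  | (l, i) :: rest =>
    let ids := ((l, i) :: rest.takeWhile (fun p => p.1 == l)).foldl
      (fun ids p => if ids = [] ∨ ids.getLast? ≠ some p.2 then ids ++ [p.2] else ids) []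
    (l, ids) :: pvGroupRuns (rest.dropWhile (fun p => p.1 == l))
termination_by Q => Q.length
decreasing_by
  simp only [List.length_cons]
  exact Nat.lt_succ_of_le (List.length_dropWhile_le _ _)

def build_frame_label_candidates_py_alt (visible_object_ids : List Int) (objects_by_id : List (Int × List (String × String))) : List String × (List (String × List Int)) :=
  let pairs : List (String × Int) :=
    visible_object_ids.foldl (fun acc obj_id =>
      match (PySem.Dict.mk objects_by_id).get? obj_id with
      | none => acc
      | some obj =>
        let label := PySem.Str.lower (PySem.Str.strip ((PySem.Dict.mk obj).getD "label" ""))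
        if label = "" ∨ PySem.Set.contains pvEXCLUDED_LABELS label then acc
        else acc ++ [(label, obj_id)]) []
  let normalized := pvGroupRuns (PySem.List.sorted2 pairs (fun p => p.1) (fun p => p.2))
  (normalized.map (fun p => p.1), normalized)

-- ===== PRECONDITION & SPEC =====
def Spec_build_frame_label_candidates_py (visible_object_ids : List Int) (objects_by_id : List (Int × List (String × String))) (out : List String × (List (String × List Int))) : Prop := out = build_frame_label_candidates_py_alt visible_object_ids objects_by_id
instance (visible_object_ids : List Int) (objects_by_id : List (Int × List (String × String))) (out : List String × (List (String × List Int))) : Decidable (Spec_build_frame_label_candidates_py visible_object_ids objects_by_id out) := by unfold Spec_build_frame_label_candidates_py; infer_instance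

-- ===== CLAIM (what is proved, stated in full; the proofs are below) =====
def Claim_equal_build_frame_label_candidates_py : Prop := ∀ (visible_object_ids : List Int) (objects_by_id : List (Int × List (String × String))), Dom_build_frame_label_candidates_py visible_object_ids objects_by_id → Spec_build_frame_label_candidates_py visible_object_ids objects_by_id (build_frame_label_candidates_py visible_object_ids objects_by_id)

-- ===== LEMMAS AND PROOFS =====

-- the shared filtering step, as an Option-valued map over a single visible id
def pvF (objects_by_id : List (Int × List (String × String))) (obj_id : Int) : Option (String × Int) :=
  match (PySem.Dict.mk objects_by_id).get? obj_id with
  | none => none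
  | some obj =>
    let label := PySem.Str.lower (PySem.Str.strip ((PySem.Dict.mk obj).getD "label" ""))
    if label = "" ∨ PySem.Set.contains pvEXCLUDED_LABELS label then none
    else some (label, obj_id)

-- lexicographic ≤ on (label, id) pairs
def pvRle (a b : String × Int) : Prop := a.1 < b.1 ∨ (a.1 = b.1 ∧ a.2 ≤ b.2)

-- the strict lexicographic comparator sorted2 uses (definitionally)
def pvBfr (a b : String × Int) : Bool := decide (a.1 < b.1) || (!decide (b.1 < a.1) && decide (a.2 < b.2))

theorem pvRle_of_not_bfr (a b : String × Int) (h : pvBfr b a = false) : pvRle a b := by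
  unfold pvBfr at h; unfold pvRle
  simp only [Bool.or_eq_false_iff, Bool.and_eq_false_iff, decide_eq_false_iff_not, Bool.not_eq_false', decide_eq_true_eq] at h
  obtain ⟨h1, h2⟩ := h
  rcases lt_or_eq_of_le (not_lt.mp h1) with hlt | heq
  · exact Or.inl hlt
  · rcases h2 with h2 | h2
    · exact absurd (heq ▸ h2) (lt_irrefl _)
    · exact Or.inr ⟨heq, not_lt.mp h2⟩

theorem pvRle_of_bfr (a b : String × Int) (h : pvBfr a b = true) : pvRle a b := by
  unfold pvBfr at h; unfold pvRle
  simp only [Bool.or_eq_true, Bool.and_eq_true, Bool.not_eq_true', decide_eq_false_iff_not, decide_eq_true_eq] at h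
  rcases h with h | ⟨h1, h2⟩
  · exact Or.inl h
  · rcases lt_or_eq_of_le (not_lt.mp h1) with hlt | heq
    · exact Or.inl hlt
    · exact Or.inr ⟨heq, le_of_lt h2⟩

theorem pvRle_trans_bfr (x y z : String × Int) (h1 : pvBfr x y = true) (h2 : pvRle y z) : pvRle x z := by
  unfold pvBfr at h1; unfold pvRle at *
  simp only [Bool.or_eq_true, Bool.and_eq_true, Bool.not_eq_true', decide_eq_false_iff_not, decide_eq_true_eq] at h1
  rcases h1 with h1 | ⟨ha, hb⟩
  · rcases h2 with h2 | ⟨he, _⟩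
    · exact Or.inl (lt_trans h1 h2)
    · exact Or.inl (he ▸ h1)
  · rcases lt_or_eq_of_le (not_lt.mp ha) with hlt | heq
    · rcases h2 with h2 | ⟨he, _⟩
      · exact Or.inl (lt_trans hlt h2)
      · exact Or.inl (he ▸ hlt)
    · rcases h2 with h2 | ⟨he, hs⟩
      · exact Or.inl (heq ▸ h2)
      · exact Or.inr ⟨heq.trans he, le_trans (le_of_lt hb) hs⟩

theorem pvInsertBy_pairwise (x : String × Int) (acc : List (String × Int)) (h : acc.Pairwise pvRle) :
    (PySem.List.insertBy pvBfr x acc).Pairwise pvRle := by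
  induction acc with
  | nil => simp [PySem.List.insertBy]
  | cons y ys ih =>
    rw [List.pairwise_cons] at h
    obtain ⟨hy, hys⟩ := h
    by_cases hb : pvBfr x y = true
    · rw [show PySem.List.insertBy pvBfr x (y :: ys) = x :: y :: ys by simp [PySem.List.insertBy, hb]]
      refine List.Pairwise.cons ?_ (List.Pairwise.cons hy hys)
      intro z hz
      rcases List.mem_cons.mp hz with rfl | hz
      · exact pvRle_of_bfr _ _ hb
      · exact pvRle_trans_bfr x y z hb (hy z hz)
    · rw [show PySem.List.insertBy pvBfr x (y :: ys) = y :: PySem.List.insertBy pvBfr x ys by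
        simp [PySem.List.insertBy, hb]]
      refine List.Pairwise.cons ?_ (ih hys)
      intro z hz
      rcases (PySem.List.mem_insertBy pvBfr x z ys).mp hz with rfl | hz
      · exact pvRle_of_not_bfr y z (Bool.eq_false_iff.mpr hb)
      · exact hy z hz

theorem pvSorted2_pairwise (xs : List (String × Int)) :
    (PySem.List.sorted2 xs (fun p => p.1) (fun p => p.2)).Pairwise pvRle := by
  have key : ∀ (l : List (String × Int)) (acc : List (String × Int)), acc.Pairwise pvRle →
      (l.foldl (fun acc x => PySem.List.insertBy pvBfr x acc) acc).Pairwise pvRle := by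
    intro l
    induction l with
    | nil => intro acc h; exact h
    | cons a t ih => intro acc h; exact ih _ (pvInsertBy_pairwise a acc h)
  exact key xs [] List.Pairwise.nil

theorem pvGetLast_max (l : List Int) (h : l.Pairwise (· < ·)) (x : Int) (hx : x ∈ l) :
    ∃ m, l.getLast? = some m ∧ x ≤ m := by
  induction l generalizing x with
  | nil => cases hx
  | cons a t ih =>
    rw [List.pairwise_cons] at h
    obtain ⟨ha, ht⟩ := h
    cases t with
    | nil =>
      rcases List.mem_singleton.mp hx with rfl
      exact ⟨x, rfl, le_refl x⟩
    | cons b t' =>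
      rcases List.mem_cons.mp hx with rfl | hx'
      · obtain ⟨m, hm, hbm⟩ := ih ht b List.mem_cons_self
        exact ⟨m, by rw [List.getLast?_cons_cons]; exact hm,
          le_trans (le_of_lt (ha b List.mem_cons_self)) hbm⟩
      · obtain ⟨m, hm, hxm⟩ := ih ht x hx'
        exact ⟨m, by rw [List.getLast?_cons_cons]; exact hm, hxm⟩

theorem pvDedupLoop_spec (xs acc : List Int) (hacc : acc.Pairwise (· < ·))
    (hxs : xs.Pairwise (· ≤ ·)) (hle : ∀ a ∈ acc, ∀ y ∈ xs, a ≤ y) :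
    (xs.foldl (fun ids x => if ids = [] ∨ ids.getLast? ≠ some x then ids ++ [x] else ids) acc).Pairwise (· < ·) ∧
    ∀ y, y ∈ xs.foldl (fun ids x => if ids = [] ∨ ids.getLast? ≠ some x then ids ++ [x] else ids) acc ↔ y ∈ acc ∨ y ∈ xs := by
  induction xs generalizing acc with
  | nil => exact ⟨hacc, fun y => by simp⟩
  | cons x t ih =>
    rw [List.pairwise_cons] at hxs
    obtain ⟨hxt, ht⟩ := hxs
    simp only [List.foldl_cons]
    by_cases hc : acc = [] ∨ acc.getLast? ≠ some x
    · rw [if_pos hc]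
      have hacc' : (acc ++ [x]).Pairwise (· < ·) := by
        rw [List.pairwise_append]
        refine ⟨hacc, List.pairwise_singleton _ _, ?_⟩
        intro a ha y hy
        rcases List.mem_singleton.mp hy with rfl
        rcases lt_or_eq_of_le (hle a ha y List.mem_cons_self) with hlt | heq
        · exact hlt
        · exfalso
          obtain ⟨m, hm, hym⟩ := pvGetLast_max acc hacc y (heq ▸ ha)
          have hmy : m ≤ y := by
            obtain ⟨m', hm', _⟩ := pvGetLast_max acc hacc y (heq ▸ ha)
            have hmmem : m ∈ acc := List.mem_of_getLast? hm
            exact hle m hmmem y List.mem_cons_self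
          have : m = y := le_antisymm hmy hym
          rcases hc with hc | hc
          · rw [hc] at hm; cases hm
          · exact hc (by rw [hm, this])
      have hle' : ∀ a ∈ acc ++ [x], ∀ y ∈ t, a ≤ y := by
        intro a ha y hy
        rcases List.mem_append.mp ha with ha | ha
        · exact hle a ha y (List.mem_cons_of_mem _ hy)
        · rcases List.mem_singleton.mp ha with rfl; exact hxt y hy
      obtain ⟨h1, h2⟩ := ih (acc ++ [x]) hacc' ht hle'
      refine ⟨h1, fun y => ?_⟩
      rw [h2 y]
      simp [or_assoc, List.mem_append]
    · rw [if_neg hc]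
      rw [not_or, not_not] at hc
      obtain ⟨hne, hlast⟩ := hc
      have hxmem : x ∈ acc := List.mem_of_getLast? hlast
      have hle' : ∀ a ∈ acc, ∀ y ∈ t, a ≤ y := fun a ha y hy => hle a ha y (List.mem_cons_of_mem _ hy)
      obtain ⟨h1, h2⟩ := ih acc hacc ht hle'
      refine ⟨h1, fun y => ?_⟩
      rw [h2 y]
      constructor
      · rintro (h | h)
        · exact Or.inl h
        · exact Or.inr (List.mem_cons_of_mem _ h)
      · rintro (h | h)
        · exact Or.inl h
        · rcases List.mem_cons.mp h with rfl | h
          · exact Or.inl hxmem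
          · exact Or.inr h

-- sorted(set(xs)) only depends on the multiset of xs
theorem pvSortedOfList_congr {α : Type} [LinearOrder α] [BEq α] [LawfulBEq α] (xs ys : List α) (h : xs.Perm ys) :
    PySem.List.sorted (PySem.Set.ofList xs) (fun x => x) = PySem.List.sorted (PySem.Set.ofList ys) (fun x => x) := by
  apply PySem.List.sorted_eq_sorted_of_perm _ _ _ (fun a b hab => hab)
  rw [List.perm_ext_iff_of_nodup (PySem.Set.nodup_ofList xs) (PySem.Set.nodup_ofList ys)]
  intro a
  rw [PySem.Set.mem_ofList, PySem.Set.mem_ofList]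
  exact ⟨fun hx => h.mem_iff.mp hx, fun hy => h.mem_iff.mpr hy⟩

-- any strictly increasing list with the right members IS sorted(set(xs))
theorem pvSortedOfList_eq {α : Type} [LinearOrder α] [BEq α] [LawfulBEq α] (xs ys : List α)
    (hmem : ∀ a, a ∈ ys ↔ a ∈ xs) (hp : ys.Pairwise (· < ·)) :
    PySem.List.sorted (PySem.Set.ofList xs) (fun x => x) = ys := by
  apply PySem.List.sorted_eq_of_perm_of_pairwise_lt
  · rw [List.perm_ext_iff_of_nodup (hp.imp ne_of_lt) (PySem.Set.nodup_ofList xs)]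
    intro a
    rw [hmem a, PySem.Set.mem_ofList]
  · exact hp

-- grouping a lexicographically ordered pair list
theorem pvGroupRuns_eq_aux : ∀ (n : Nat) (Q : List (String × Int)), Q.length ≤ n → Q.Pairwise pvRle →
    pvGroupRuns Q = (PySem.List.sorted (PySem.Set.ofList (Q.map (fun p => p.1))) (fun k => k)).map
      (fun k => (k, PySem.List.sorted (PySem.Set.ofList ((Q.filter (fun p => p.1 == k)).map (fun p => p.2))) (fun x => x))) := by
  intro n
  induction n with
  | zero =>
    intro Q hn _
    have hQ : Q = [] := List.eq_nil_of_length_eq_zero (Nat.le_zero.mp hn)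
    subst hQ
    rw [show pvGroupRuns [] = [] from by rw [pvGroupRuns]]
    rfl
  | succ n ih =>
    intro Q hn hP
    match Q with
    | [] =>
      rw [show pvGroupRuns [] = [] from by rw [pvGroupRuns]]
      rfl
    | (l, i) :: rest =>
      rw [List.pairwise_cons] at hP
      obtain ⟨hhead, hrest⟩ := hP
      have hsplit : rest.takeWhile (fun q => q.1 == l) ++ rest.dropWhile (fun q => q.1 == l) = rest :=
        List.takeWhile_append_dropWhile
      have hrunl : ∀ q ∈ rest.takeWhile (fun q => q.1 == l), q.1 = l := by
        intro q hq
        have h := List.mem_takeWhile_imp (p := fun q : String × Int => q.1 == l) hq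
        simpa using h
      have hrest'sub : (rest.dropWhile (fun q => q.1 == l)).Sublist rest := List.dropWhile_sublist _
      have hrest'pair : (rest.dropWhile (fun q => q.1 == l)).Pairwise pvRle := hrest.sublist hrest'sub
      have hle_head : ∀ q ∈ rest, l ≤ q.1 := by
        intro q hq
        rcases hhead q hq with h | ⟨h, _⟩
        · exact le_of_lt h
        · exact le_of_eq h
      have hgt : ∀ q ∈ rest.dropWhile (fun q => q.1 == l), l < q.1 := by
        intro q hq
        cases hR : rest.dropWhile (fun q => q.1 == l) with
        | nil => rw [hR] at hq; cases hq
        | cons h0 t =>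
          have hh0 : (h0.1 == l) = false := by
            have := List.head?_dropWhile_not (fun q : String × Int => q.1 == l) rest
            rw [hR] at this
            simpa using this
          have hh0ne : h0.1 ≠ l := by simpa using hh0
          have hh0mem : h0 ∈ rest := hrest'sub.mem (hR ▸ List.mem_cons_self)
          have hlt0 : l < h0.1 := lt_of_le_of_ne (hle_head h0 hh0mem) (Ne.symm hh0ne)
          rw [hR] at hq
          rcases List.mem_cons.mp hq with rfl | hq'
          · exact hlt0
          · have hrq : pvRle h0 q := by
              rw [hR] at hrest'pair
              exact (List.pairwise_cons.mp hrest'pair).1 q hq'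
            rcases hrq with h | ⟨h, _⟩
            · exact lt_trans hlt0 h
            · exact h ▸ hlt0
      -- the filter at the current label is the head plus the run
      have hfl : (((l, i) :: rest).filter (fun q => q.1 == l)) = (l, i) :: rest.takeWhile (fun q => q.1 == l) := by
        have hall : List.filter (fun q : String × Int => q.1 == l) ((l, i) :: rest.takeWhile (fun q => q.1 == l))
            = (l, i) :: rest.takeWhile (fun q => q.1 == l) := by
          rw [List.filter_eq_self]
          intro a ha
          rcases List.mem_cons.mp ha with rfl | ha
          · simp
          · simp [hrunl a ha]
        have hnil : List.filter (fun q : String × Int => q.1 == l) (rest.dropWhile (fun q => q.1 == l)) = [] := by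
          rw [List.filter_eq_nil_iff]
          intro a ha
          simpa using ne_of_gt (hgt a ha)
        conv_lhs => rw [← hsplit]
        rw [show ((l, i) :: (rest.takeWhile (fun q => q.1 == l) ++ rest.dropWhile (fun q => q.1 == l)))
            = (((l, i) :: rest.takeWhile (fun q => q.1 == l)) ++ rest.dropWhile (fun q => q.1 == l)) from rfl]
        rw [List.filter_append, hall, hnil, List.append_nil]
      -- the filter at any later label ignores the head and the run
      have hfk : ∀ k, l < k → (((l, i) :: rest).filter (fun q => q.1 == k))
          = (rest.dropWhile (fun q => q.1 == l)).filter (fun q => q.1 == k) := by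
        intro k hk
        have hnil : List.filter (fun q : String × Int => q.1 == k) ((l, i) :: rest.takeWhile (fun q => q.1 == l)) = [] := by
          rw [List.filter_eq_nil_iff]
          intro a ha
          have hal : a.1 = l := by
            rcases List.mem_cons.mp ha with rfl | ha
            · rfl
            · exact hrunl a ha
          simpa [hal] using ne_of_lt hk
        conv_lhs => rw [← hsplit]
        rw [show ((l, i) :: (rest.takeWhile (fun q => q.1 == l) ++ rest.dropWhile (fun q => q.1 == l)))
            = (((l, i) :: rest.takeWhile (fun q => q.1 == l)) ++ rest.dropWhile (fun q => q.1 == l)) from rfl]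
        rw [List.filter_append, hnil, List.nil_append]
      -- the sorted distinct labels are l followed by those of the remainder
      have hkeys : PySem.List.sorted (PySem.Set.ofList ((((l, i) :: rest)).map (fun p => p.1))) (fun k => k)
          = l :: PySem.List.sorted (PySem.Set.ofList ((rest.dropWhile (fun q => q.1 == l)).map (fun p => p.1))) (fun k => k) := by
        apply pvSortedOfList_eq
        · intro a
          constructor
          · intro ha
            rcases List.mem_cons.mp ha with rfl | ha
            · exact List.mem_map.mpr ⟨(a, i), List.mem_cons_self, rfl⟩
            · have : a ∈ (rest.dropWhile (fun q => q.1 == l)).map (fun p => p.1) := by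
                rw [PySem.List.mem_sorted, PySem.Set.mem_ofList] at ha
                exact ha
              obtain ⟨q, hq, rfl⟩ := List.mem_map.mp this
              exact List.mem_map.mpr ⟨q, List.mem_cons_of_mem _ (hrest'sub.mem hq), rfl⟩
          · intro ha
            obtain ⟨q, hq, rfl⟩ := List.mem_map.mp ha
            rcases List.mem_cons.mp hq with rfl | hq
            · exact List.mem_cons_self
            · conv at hq => rw [← hsplit]
              rcases List.mem_append.mp hq with hq | hq
              · exact (hrunl q hq) ▸ List.mem_cons_self
              · refine List.mem_cons_of_mem _ ?_
                rw [PySem.List.mem_sorted, PySem.Set.mem_ofList]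
                exact List.mem_map.mpr ⟨q, hq, rfl⟩
        · refine List.Pairwise.cons ?_ (PySem.List.sorted_ofList_pairwise_lt _)
          intro b hb
          rw [PySem.List.mem_sorted, PySem.Set.mem_ofList] at hb
          obtain ⟨q, hq, rfl⟩ := List.mem_map.mp hb
          exact hgt q hq
      -- the deduplicating inner loop produces the sorted distinct ids of the run
      have hsnds : (((l, i) :: rest.takeWhile (fun q => q.1 == l)).map (fun p => p.2)).Pairwise (· ≤ ·) := by
        rw [List.pairwise_map]
        have hpw : ((l, i) :: rest.takeWhile (fun q => q.1 == l)).Pairwise pvRle := by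
          refine List.Pairwise.cons ?_ (hrest.sublist (List.takeWhile_sublist _))
          intro q hq
          exact hhead q ((List.takeWhile_sublist _).mem hq)
        refine hpw.imp_of_mem ?_
        intro a b ha hb hab
        have hal : a.1 = l := by
          rcases List.mem_cons.mp ha with rfl | ha
          · rfl
          · exact hrunl a ha
        have hbl : b.1 = l := by
          rcases List.mem_cons.mp hb with rfl | hb
          · rfl
          · exact hrunl b hb
        rcases hab with h | ⟨_, h⟩
        · rw [hal, hbl] at h
          exact absurd h (lt_irrefl l)
        · exact h
      have hspec := pvDedupLoop_spec (((l, i) :: rest.takeWhile (fun q => q.1 == l)).map (fun p => p.2)) []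
        List.Pairwise.nil hsnds (by simp)
      have hfold : ((l, i) :: rest.takeWhile (fun q => q.1 == l)).foldl
          (fun ids p => if ids = [] ∨ ids.getLast? ≠ some p.2 then ids ++ [p.2] else ids) []
          = (((l, i) :: rest.takeWhile (fun q => q.1 == l)).map (fun p => p.2)).foldl
            (fun ids x => if ids = [] ∨ ids.getLast? ≠ some x then ids ++ [x] else ids) [] :=
        (List.foldl_map (f := fun p : String × Int => p.2)
          (g := fun ids x => if ids = [] ∨ ids.getLast? ≠ some x then ids ++ [x] else ids)
          (l := (l, i) :: rest.takeWhile (fun q => q.1 == l)) (init := [])).symm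
      have hids : PySem.List.sorted
          (PySem.Set.ofList (((((l, i) :: rest).filter (fun q => q.1 == l))).map (fun p => p.2))) (fun x => x)
          = ((l, i) :: rest.takeWhile (fun q => q.1 == l)).foldl
              (fun ids p => if ids = [] ∨ ids.getLast? ≠ some p.2 then ids ++ [p.2] else ids) [] := by
        rw [hfl, hfold]
        apply pvSortedOfList_eq
        · intro a
          rw [(hspec.2 a)]
          simp
        · exact hspec.1
      -- assemble
      rw [show pvGroupRuns ((l, i) :: rest) = (l, ((l, i) :: rest.takeWhile (fun q => q.1 == l)).foldl
            (fun ids p => if ids = [] ∨ ids.getLast? ≠ some p.2 then ids ++ [p.2] else ids) []) ::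
            pvGroupRuns (rest.dropWhile (fun q => q.1 == l)) from by rw [pvGroupRuns]]
      rw [hkeys, List.map_cons, ← hids]
      congr 1
      rw [ih (rest.dropWhile (fun q => q.1 == l))
        (le_trans (List.length_dropWhile_le _ _) (by simpa using Nat.le_of_succ_le_succ hn)) hrest'pair]
      apply List.map_congr_left
      intro k hk
      rw [PySem.List.mem_sorted, PySem.Set.mem_ofList] at hk
      obtain ⟨q, hq, rfl⟩ := List.mem_map.mp hk
      rw [hfk q.1 (hgt q hq)]

theorem pvGroupRuns_eq (Q : List (String × Int)) (h : Q.Pairwise pvRle) :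
    pvGroupRuns Q = (PySem.List.sorted (PySem.Set.ofList (Q.map (fun p => p.1))) (fun k => k)).map
      (fun k => (k, PySem.List.sorted (PySem.Set.ofList ((Q.filter (fun p => p.1 == k)).map (fun p => p.2))) (fun x => x))) :=
  pvGroupRuns_eq_aux Q.length Q (le_refl _) h

-- A's accumulation loop is the modify-fold over the filtered pairs
theorem pvA_fold (objs : List (Int × List (String × String))) (vis : List Int) (d : PySem.Dict String (List Int)) :
    vis.foldl (fun d obj_id =>
      match (PySem.Dict.mk objs).get? obj_id with
      | none => d
      | some obj =>
        let label := PySem.Str.lower (PySem.Str.strip ((PySem.Dict.mk obj).getD "label" ""))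
        if label = "" ∨ PySem.Set.contains pvEXCLUDED_LABELS label then d
        else d.modify label [] (fun ids => ids ++ [obj_id])) d
    = (vis.filterMap (pvF objs)).foldl (fun d p => d.modify p.1 [] (fun ids => ids ++ [p.2])) d := by
  induction vis generalizing d with
  | nil => rfl
  | cons a t ih =>
    simp only [List.foldl_cons, List.filterMap_cons]
    cases hg : (PySem.Dict.mk objs).get? a with
    | none => rw [show pvF objs a = none by simp [pvF, hg]]; exact ih _
    | some obj =>
      by_cases hc : PySem.Str.lower (PySem.Str.strip ((PySem.Dict.mk obj).getD "label" "")) = "" ∨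
          PySem.Set.contains pvEXCLUDED_LABELS (PySem.Str.lower (PySem.Str.strip ((PySem.Dict.mk obj).getD "label" "")))
      · rw [show pvF objs a = none by simp only [pvF, hg]; exact if_pos hc]
        simp only [if_pos hc]
        exact ih _
      · rw [show pvF objs a = some (PySem.Str.lower (PySem.Str.strip ((PySem.Dict.mk obj).getD "label" "")), a) by
          simp only [pvF, hg]; exact if_neg hc]
        simp only [if_neg hc, List.foldl_cons]
        exact ih _

-- B's accumulation loop collects exactly the filtered pairs
theorem pvB_fold (objs : List (Int × List (String × String))) (vis : List Int) (acc : List (String × Int)) :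
    vis.foldl (fun acc obj_id =>
      match (PySem.Dict.mk objs).get? obj_id with
      | none => acc
      | some obj =>
        let label := PySem.Str.lower (PySem.Str.strip ((PySem.Dict.mk obj).getD "label" ""))
        if label = "" ∨ PySem.Set.contains pvEXCLUDED_LABELS label then acc
        else acc ++ [(label, obj_id)]) acc
    = acc ++ vis.filterMap (pvF objs) := by
  induction vis generalizing acc with
  | nil => simp
  | cons a t ih =>
    simp only [List.foldl_cons, List.filterMap_cons]
    cases hg : (PySem.Dict.mk objs).get? a with
    | none => rw [show pvF objs a = none by simp [pvF, hg]]; exact ih _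
    | some obj =>
      by_cases hc : PySem.Str.lower (PySem.Str.strip ((PySem.Dict.mk obj).getD "label" "")) = "" ∨
          PySem.Set.contains pvEXCLUDED_LABELS (PySem.Str.lower (PySem.Str.strip ((PySem.Dict.mk obj).getD "label" "")))
      · rw [show pvF objs a = none by simp only [pvF, hg]; exact if_pos hc]
        simp only [if_pos hc]
        exact ih _
      · rw [show pvF objs a = some (PySem.Str.lower (PySem.Str.strip ((PySem.Dict.mk obj).getD "label" "")), a) by
          simp only [pvF, hg]; exact if_neg hc]
        simp only [if_neg hc]
        rw [ih _, List.append_assoc]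
        rfl

-- both ports in one shared normal form
theorem pvA_normal (vis : List Int) (objs : List (Int × List (String × String))) :
    build_frame_label_candidates_py vis objs =
      (let P := vis.filterMap (pvF objs)
       let S := PySem.List.sorted (PySem.Set.ofList (P.map (fun p => p.1))) (fun k => k)
       (S, S.map (fun k => (k, PySem.List.sorted (PySem.Set.ofList ((P.filter (fun p => p.1 == k)).map (fun p => p.2))) (fun x => x))))) := by
  simp only [build_frame_label_candidates_py]
  rw [pvA_fold]
  generalize vis.filterMap (pvF objs) = P
  have hkeys : (P.foldl (fun d p => d.modify p.1 [] (fun ids => ids ++ [p.2])) PySem.Dict.empty).keys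
      = PySem.Set.ofList (P.map (fun p => p.1)) := by
    have h := PySem.Dict.keys_foldl_modify_key (ν := List Int) P (fun p => p.1) []
      (fun _ p ids => ids ++ [p.2]) PySem.Dict.empty
    rw [PySem.Dict.keys_empty] at h
    exact h
  have hnodup : (P.foldl (fun d p => d.modify p.1 [] (fun ids => ids ++ [p.2])) PySem.Dict.empty).keys.Nodup := by
    rw [hkeys]
    exact PySem.Set.nodup_ofList _
  have hgetD : ∀ k, (P.foldl (fun d p => d.modify p.1 [] (fun ids => ids ++ [p.2])) PySem.Dict.empty).getD k []
      = (P.filter (fun p => p.1 == k)).map (fun p => p.2) := by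
    intro k
    have h := PySem.Dict.getD_foldl_modify_append P PySem.Dict.empty k
    rw [PySem.Dict.getD_empty] at h
    simpa using h
  have hitems : (P.foldl (fun d p => d.modify p.1 [] (fun ids => ids ++ [p.2])) PySem.Dict.empty).items
      = (PySem.Set.ofList (P.map (fun p => p.1))).map
          (fun k => (k, (P.filter (fun p => p.1 == k)).map (fun p => p.2))) := by
    rw [PySem.Dict.items_eq_map_keys _ hnodup [], hkeys]
    exact List.map_congr_left (fun k _ => by rw [hgetD k])
  have hsorted : PySem.List.sorted
      (P.foldl (fun d p => d.modify p.1 [] (fun ids => ids ++ [p.2])) PySem.Dict.empty).items (fun p => p.1)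
      = (PySem.List.sorted (PySem.Set.ofList (P.map (fun p => p.1))) (fun k => k)).map
          (fun k => (k, (P.filter (fun p => p.1 == k)).map (fun p => p.2))) := by
    apply PySem.List.sorted_eq_of_perm_of_pairwise_lt
    · rw [hitems]
      exact (PySem.List.sorted_perm _ _ _).map _
    · rw [List.pairwise_map]
      exact PySem.List.sorted_ofList_pairwise_lt _
  rw [hsorted]
  have hfresh : ∀ a ∈ (PySem.List.sorted (PySem.Set.ofList (P.map (fun p => p.1))) (fun k => k)).map
      (fun k => (k, (P.filter (fun p => p.1 == k)).map (fun p => p.2))),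
      (PySem.Dict.empty (ν := List Int)).contains a.1 = false := fun a _ => PySem.Dict.contains_empty _
  have hnodupS : (((PySem.List.sorted (PySem.Set.ofList (P.map (fun p => p.1))) (fun k => k)).map
      (fun k => (k, (P.filter (fun p => p.1 == k)).map (fun p => p.2)))).map (fun p => p.1)).Nodup := by
    rw [List.map_map]
    have : ((fun p : String × List Int => p.1) ∘ fun k => (k, (P.filter (fun p => p.1 == k)).map (fun p => p.2)))
        = fun k => k := rfl
    rw [this, List.map_id']
    exact ((PySem.List.sorted_perm _ _ _).nodup_iff).mpr (PySem.Set.nodup_ofList _)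
  have hN := PySem.Dict.items_foldl_insert_fresh
    ((PySem.List.sorted (PySem.Set.ofList (P.map (fun p => p.1))) (fun k => k)).map
      (fun k => (k, (P.filter (fun p => p.1 == k)).map (fun p => p.2))))
    (fun p => p.1) (fun p => PySem.List.sorted (PySem.Set.ofList p.2) (fun x => x)) PySem.Dict.empty hfresh hnodupS
  rw [show (PySem.Dict.empty (κ := String) (ν := List Int)).items = [] from rfl, List.nil_append] at hN
  have hNitems : (((PySem.List.sorted (PySem.Set.ofList (P.map (fun p => p.1))) (fun k => k)).map
        (fun k => (k, (P.filter (fun p => p.1 == k)).map (fun p => p.2)))).foldl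
        (fun d p => d.insert p.1 (PySem.List.sorted (PySem.Set.ofList p.2) (fun x => x))) PySem.Dict.empty).items
      = (PySem.List.sorted (PySem.Set.ofList (P.map (fun p => p.1))) (fun k => k)).map
          (fun k => (k, PySem.List.sorted
            (PySem.Set.ofList ((P.filter (fun p => p.1 == k)).map (fun p => p.2))) (fun x => x))) := by
    rw [hN, List.map_map]
    rfl
  have hNkeys : (((PySem.List.sorted (PySem.Set.ofList (P.map (fun p => p.1))) (fun k => k)).map
        (fun k => (k, (P.filter (fun p => p.1 == k)).map (fun p => p.2)))).foldl
        (fun d p => d.insert p.1 (PySem.List.sorted (PySem.Set.ofList p.2) (fun x => x))) PySem.Dict.empty).keys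
      = PySem.List.sorted (PySem.Set.ofList (P.map (fun p => p.1))) (fun k => k) := by
    show (((PySem.List.sorted (PySem.Set.ofList (P.map (fun p => p.1))) (fun k => k)).map
        (fun k => (k, (P.filter (fun p => p.1 == k)).map (fun p => p.2)))).foldl
        (fun d p => d.insert p.1 (PySem.List.sorted (PySem.Set.ofList p.2) (fun x => x))) PySem.Dict.empty).items.map
          (fun p => p.1) = _
    rw [hNitems, List.map_map]
    have : ((fun p : String × List Int => p.1) ∘ fun k => (k, PySem.List.sorted
        (PySem.Set.ofList ((P.filter (fun p => p.1 == k)).map (fun p => p.2))) (fun x => x))) = fun k => k := rfl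
    rw [this, List.map_id']
  rw [hNitems, hNkeys, PySem.List.sorted_sorted]

theorem pvB_normal (vis : List Int) (objs : List (Int × List (String × String))) :
    build_frame_label_candidates_py_alt vis objs =
      (let P := vis.filterMap (pvF objs)
       let S := PySem.List.sorted (PySem.Set.ofList (P.map (fun p => p.1))) (fun k => k)
       (S, S.map (fun k => (k, PySem.List.sorted (PySem.Set.ofList ((P.filter (fun p => p.1 == k)).map (fun p => p.2))) (fun x => x))))) := by
  simp only [build_frame_label_candidates_py_alt]
  rw [pvB_fold, List.nil_append]
  have hQperm := PySem.List.sorted2_perm (vis.filterMap (pvF objs)) (fun p => p.1) (fun p => p.2) false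
  rw [pvGroupRuns_eq _ (pvSorted2_pairwise (vis.filterMap (pvF objs)))]
  have hK : PySem.List.sorted (PySem.Set.ofList
        ((PySem.List.sorted2 (vis.filterMap (pvF objs)) (fun p => p.1) (fun p => p.2)).map (fun p => p.1))) (fun k => k)
      = PySem.List.sorted (PySem.Set.ofList ((vis.filterMap (pvF objs)).map (fun p => p.1))) (fun k => k) :=
    pvSortedOfList_congr _ _ (hQperm.map _)
  have hV : ∀ k, PySem.List.sorted (PySem.Set.ofList
        (((PySem.List.sorted2 (vis.filterMap (pvF objs)) (fun p => p.1) (fun p => p.2)).filter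
          (fun p => p.1 == k)).map (fun p => p.2))) (fun x => x)
      = PySem.List.sorted (PySem.Set.ofList
          (((vis.filterMap (pvF objs)).filter (fun p => p.1 == k)).map (fun p => p.2))) (fun x => x) :=
    fun k => pvSortedOfList_congr _ _ ((hQperm.filter _).map _)
  rw [hK]
  have hfun : (fun k => (k, PySem.List.sorted (PySem.Set.ofList
        (((PySem.List.sorted2 (vis.filterMap (pvF objs)) (fun p => p.1) (fun p => p.2)).filter
          (fun p => p.1 == k)).map (fun p => p.2))) (fun x => x)))
      = (fun k => (k, PySem.List.sorted (PySem.Set.ofList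
          (((vis.filterMap (pvF objs)).filter (fun p => p.1 == k)).map (fun p => p.2))) (fun x => x))) :=
    funext (fun k => by rw [hV k])
  rw [hfun, List.map_map]
  rw [show ((fun p : String × List Int => p.1) ∘ fun k => (k, PySem.List.sorted
      (PySem.Set.ofList (((vis.filterMap (pvF objs)).filter (fun p => p.1 == k)).map (fun p => p.2)))
      (fun x => x))) = fun k => k from rfl]
  rw [List.map_id']

-- ===== VERDICT (by name: the statement is the Claim_ definition above) =====
theorem build_frame_label_candidates_py_spec : Claim_equal_build_frame_label_candidates_py := by
  intro vis objs _
  unfold Spec_build_frame_label_candidates_py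
  rw [pvA_normal, pvB_normal]
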